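-- pv_equiv track=rewrite | github.com/visuanalytics/visuanalytics | src/visuanalytics/server/db/queries.py | _generate_storing
-- ===== SOURCE A (Python) =====
-- def remove_toplevel_key(obj):
--     if type(obj) == list:
--         for x in range(len(obj)):
--             obj[x] = remove_toplevel_key(obj[x])
--     elif type(obj) == dict:
--         for key in list(obj.keys()):
--             obj[key] = remove_toplevel_key(obj[key])
--     elif type(obj) == str:
--         obj = obj.replace("$toplevel_array$", "").replace("||", "|").replace("| ", " ")
--         if len(obj) > 0 and obj[-1] == "|":
--             obj = obj[:-1]
--         if len(obj) > 0 and obj[0] == "|":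
--             obj = obj[1:]
--     return obj
--
-- def _generate_storing(historized_data, datasource_name, formula_keys, old_storing):
--     storing = old_storing
--     historized_data = remove_toplevel_key(historized_data)
--     for key in historized_data:
--         key_string = "_req|" + datasource_name + "|" + key if key not in formula_keys else key
--         if key_string[-1] == "|":
--             key_string = key_string[:-1]
--         storing.append({
--             "name": key.replace("|", "_"),
--             "key": key_string
--         })
--     return storing
-- ===== SOURCE B (Python) =====
-- def _generate_storing(historized_data, datasource_name, formula_keys, old_storing):
--     # remove_toplevel_key only rewrites the dict's *values*, which never reach the
--     # output: the stored entries are built from the keys alone, so the whole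
--     # recursive cleanup pass is dropped.  Like A, this appends to old_storing in
--     # place (A additionally mutates historized_data's values in place; the
--     # equivalence claimed is about the return value).
--     formulas = set(formula_keys)
--     for key in historized_data:
--         key_string = key if key in formulas else "_req|" + datasource_name + "|" + key
--         if key_string.endswith("|"):
--             key_string = key_string[:-1]
--         old_storing.append({"name": key.replace("|", "_"), "key": key_string})
--     return old_storing
-- ===== Notes on version B (the rewrite author's own statement) =====
-- stated objective: simpler
-- what changed: B drops the recursive remove_toplevel_key cleanup pass entirely (it only rewrites the dict's values, which never reach the returned storing entries) and builds the entries directly from the keys, using a set for the formula-key membership test and endswith instead of indexing for the trailing-'|' strip.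
import Mathlib
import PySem

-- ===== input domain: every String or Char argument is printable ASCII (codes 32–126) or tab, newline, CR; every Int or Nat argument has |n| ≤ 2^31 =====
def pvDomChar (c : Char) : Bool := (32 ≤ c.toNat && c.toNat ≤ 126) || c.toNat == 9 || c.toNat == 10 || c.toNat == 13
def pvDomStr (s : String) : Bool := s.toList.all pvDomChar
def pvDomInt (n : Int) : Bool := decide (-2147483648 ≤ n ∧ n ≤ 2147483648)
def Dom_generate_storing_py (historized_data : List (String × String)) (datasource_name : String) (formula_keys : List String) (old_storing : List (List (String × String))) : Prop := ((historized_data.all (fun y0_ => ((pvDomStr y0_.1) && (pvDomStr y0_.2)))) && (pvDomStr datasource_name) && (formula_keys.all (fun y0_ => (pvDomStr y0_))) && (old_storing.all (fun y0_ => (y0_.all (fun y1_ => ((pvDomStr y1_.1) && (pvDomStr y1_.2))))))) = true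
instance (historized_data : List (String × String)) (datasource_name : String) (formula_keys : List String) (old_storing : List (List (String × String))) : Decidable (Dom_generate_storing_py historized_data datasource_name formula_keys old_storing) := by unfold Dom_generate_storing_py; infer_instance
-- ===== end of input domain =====

-- B drops A's recursive remove_toplevel_key pass (it only rewrites the dict's values, which
-- never reach the returned entries) and builds the storing entries from the keys alone;
-- equivalence is about the RETURN value (both append to old_storing in place; A additionally
-- rewrites historized_data's values in place, B does not).

-- Python '+' on strings: exact concatenation (built over List Char so the kernel reduces it)
def pvCat (a b : String) : String := String.ofList (a.toList ++ b.toList)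

-- ===== PORT A =====
-- remove_toplevel_key's str branch: the three replaces, then one trailing- and one
-- leading-'|' strip ('len(obj) > 0 and obj[-1] == "|"' is exactly 'pyGet? _ (-1) = some '|'',
-- since pyGet? is none on the empty string; likewise for index 0)
def pvRtkStr (s : String) : String :=
  let s1 := PySem.Str.replace (PySem.Str.replace (PySem.Str.replace s "$toplevel_array$" "") "||" "|") "| " " "
  let s2 := if PySem.Str.pyGet? s1 (-1) = some '|' then PySem.Str.slice s1 none (some (-1)) else s1
  if PySem.Str.pyGet? s2 0 = some '|' then PySem.Str.slice s2 (some 1) none else s2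

-- _generate_storing: historized_data is a dict[str, str], so remove_toplevel_key's dict
-- branch rewrites each value through the str branch ('for key in list(obj.keys()):
-- obj[key] = remove_toplevel_key(obj[key])'); the final loop iterates the dict's keys.
def generate_storing_py (historized_data : List (String × String)) (datasource_name : String) (formula_keys : List String) (old_storing : List (List (String × String))) : List (List (String × String)) :=
  let d := PySem.Dict.ofList historized_data
  let d2 := d.keys.foldl (fun dd k => dd.insert k (pvRtkStr ((dd.get? k).getD ""))) d
  d2.keys.foldl (fun storing key =>
    let ks0 := if (formula_keys.contains key) = false then pvCat (pvCat (pvCat "_req|" datasource_name) "|") key else key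
    let ks := if PySem.Str.pyGet? ks0 (-1) = some '|' then PySem.Str.slice ks0 none (some (-1)) else ks0
    storing ++ [[("name", PySem.Str.replace key "|" "_"), ("key", ks)]]) old_storing

-- ===== PORT B =====
def generate_storing_py_alt (historized_data : List (String × String)) (datasource_name : String) (formula_keys : List String) (old_storing : List (List (String × String))) : List (List (String × String)) :=
  let formulas := PySem.Set.ofList formula_keys
  (PySem.Dict.ofList historized_data).keys.foldl (fun storing key =>
    let ks0 := if PySem.Set.contains formulas key then key else pvCat (pvCat (pvCat "_req|" datasource_name) "|") key
    let ks := if PySem.Str.endswith ks0 "|" then PySem.Str.slice ks0 none (some (-1)) else ks0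
    storing ++ [[("name", PySem.Str.replace key "|" "_"), ("key", ks)]]) old_storing

-- ===== PRECONDITION & SPEC =====
-- Pre_ excludes exactly the inputs on which Python A raises IndexError: '' both a key of
-- historized_data and a member of formula_keys makes key_string empty, and key_string[-1] raises.
def Pre_generate_storing_py (historized_data : List (String × String)) (datasource_name : String) (formula_keys : List String) (old_storing : List (List (String × String))) : Prop :=
  ¬ (("" ∈ historized_data.map Prod.fst) ∧ "" ∈ formula_keys)
instance (historized_data : List (String × String)) (datasource_name : String) (formula_keys : List String) (old_storing : List (List (String × String))) : Decidable (Pre_generate_storing_py historized_data datasource_name formula_keys old_storing) := by unfold Pre_generate_storing_py; infer_instance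

def pvWitness_generate_storing_py : (List (String × String)) × String × List String × (List (List (String × String))) :=
  ([("a|b", "x||y"), ("f|", "z")], "ds", ["f|"], [[("name", "o"), ("key", "k")]])

def Spec_generate_storing_py (historized_data : List (String × String)) (datasource_name : String) (formula_keys : List String) (old_storing : List (List (String × String))) (out : List (List (String × String))) : Prop := out = generate_storing_py_alt historized_data datasource_name formula_keys old_storing
instance (historized_data : List (String × String)) (datasource_name : String) (formula_keys : List String) (old_storing : List (List (String × String))) (out : List (List (String × String))) : Decidable (Spec_generate_storing_py historized_data datasource_name formula_keys old_storing out) := by unfold Spec_generate_storing_py; infer_instance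

-- ===== CLAIM (what is proved, stated in full; the proofs are below) =====
def Claim_equal_generate_storing_py : Prop := ∀ (historized_data : List (String × String)) (datasource_name : String) (formula_keys : List String) (old_storing : List (List (String × String))), Dom_generate_storing_py historized_data datasource_name formula_keys old_storing → Pre_generate_storing_py historized_data datasource_name formula_keys old_storing → Spec_generate_storing_py historized_data datasource_name formula_keys old_storing (generate_storing_py historized_data datasource_name formula_keys old_storing)


-- ===== LEMMAS AND PROOFS =====

-- s.endswith("|") says exactly what A's 'len(s) > 0 and s[-1] == "|"' test says
theorem pv_endswith_bar (s : String) :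
    (PySem.Str.endswith s "|" = true) ↔ PySem.Str.pyGet? s (-1) = some '|' := by
  rw [PySem.Str.endswith_eq, PySem.Chars.endswith_iff]
  rw [show PySem.Str.pyGet? s (-1) = PySem.List.pyGet? s.toList (-1) from PySem.Str.pyGet?_eq s (-1)]
  rw [PySem.List.pyGet?_neg_one]
  show ("|".toList <:+ s.toList) ↔ _
  constructor
  · rintro ⟨t, ht⟩; rw [← ht]; simp
  · intro h
    obtain ⟨ys, hy⟩ := List.getLast?_eq_some_iff.mp h
    exact ⟨ys, hy.symm⟩

-- membership in set(formula_keys) is membership in formula_keys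
theorem pv_contains_ofList (fk : List String) (k : String) :
    (PySem.Set.contains (PySem.Set.ofList fk) k = true) ↔ (fk.contains k = true) := by
  simp [PySem.Set.contains, PySem.Set.mem_ofList]

-- updating a set with elements it already has leaves it unchanged
theorem pv_update_of_subset (s l : List String) (h : ∀ x ∈ l, x ∈ s) :
    PySem.Set.update s l = s := by
  induction l generalizing s with
  | nil => rfl
  | cons x l ih =>
      have hx : PySem.Set.add s x = s := by
        simp [PySem.Set.add, PySem.Set.contains, h x (by simp)]
      calc PySem.Set.update s (x :: l) = PySem.Set.update (PySem.Set.add s x) l := rfl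
        _ = s := by rw [hx]; exact ih s (fun y hy => h y (by simp [hy]))

-- A's value-rewriting pass leaves the dict's keys unchanged
theorem pv_keys_unchanged (d : PySem.Dict String String) :
    (d.keys.foldl (fun dd k => dd.insert k (pvRtkStr ((dd.get? k).getD ""))) d).keys = d.keys := by
  rw [PySem.Dict.keys_foldl_insert]
  exact pv_update_of_subset d.keys d.keys (fun x hx => hx)

-- ===== VERDICT (by name: the statement is the Claim_ definition above) =====
theorem generate_storing_py_spec : Claim_equal_generate_storing_py := by
  intro historized_data datasource_name formula_keys old_storing _ _
  simp only [Spec_generate_storing_py, generate_storing_py, generate_storing_py_alt]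
  rw [pv_keys_unchanged]
  simp only [pv_endswith_bar, pv_contains_ofList, Bool.eq_false_iff, ne_eq, ite_not]
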